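-- pv_equiv track=rewrite | github.com/haquey/python-regex-reader | src/regex_functions.py | check_nested_para
-- ===== SOURCE A (Python) =====
-- def check_nested_para(s):
--     '''(str) -> bool
--
--     Return True iff the given string has a pair of parentheses within a pair
--     of parantheses (nested brackets) immiediately next to each other. For
--     example, '((abc))'. This function aids in determining whether
--     the given string is a valid regular expression.
--
--     REQ: Parantheses within the given string should be appropriately closed
--
--     >>> check_nested_para('((1.2))')
--     True
--     >>> check_nested_para('((1.2).2)')
--     False
--     >>> check_nested_para('(1.(2|e*))')
--     False
--     >>> check_nested_para('((1.2).(2.e*)')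
--     False
--     '''
--     # Get rid of any * characters within the string
--     s = s.replace('*', '')
--     found_nested_left = True
--     found_nested_right = True
--     left_para_ids = []
--     right_para_ids = []
--     i = 0
--     # Save the indexed locations of where the left/right brackets are found
--     while i < len(s):
--         if s[i] == '(':
--             left_para_ids.append(i)
--         if s[i] == ')':
--             right_para_ids.append(i)
--         i += 1
--     # Nested brackets can only occur if there is more than one pair of
--     # brackets within the string.
--     if len(left_para_ids) > 1:
--         # Find out whether each left bracket is right next to each other
--         for i in range(1, len(left_para_ids)):
--             check_id = (left_para_ids[i] - left_para_ids[i - 1]) != 1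
--             if check_id:
--                 found_nested_left = False
--         # Find out whether each rightt bracket is right next to each other
--         for i in range(1, len(right_para_ids)):
--             check_id = (right_para_ids[i] - right_para_ids[i - 1]) != 1
--             if check_id:
--                 found_nested_right = False
--
--         res = found_nested_left and found_nested_right
--     # If more than one pair of parantheses is not found, nesting doesn't occur
--     else:
--         res = False
--
--     return res
-- ===== SOURCE B (Python) =====
-- def check_nested_para(s):
--     # One pass per bracket kind: count '(' and check each kind forms one contiguous run.
--     t = s.replace('*', '')
--     lc, lsolid = _scan(t, '(')
--     return lc > 1 and lsolid and _scan(t, ')')[1]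
--
--
-- def _scan(t, ch):
--     # Return (number of ch in t, whether all ch in t are adjacent to each other).
--     cnt, solid, after = 0, True, False
--     for c in t:
--         if c == ch:
--             if after:
--                 solid = False
--             cnt += 1
--         elif cnt > 0:
--             after = True
--     return cnt, solid
-- ===== Notes on version B (the rewrite author's own statement) =====
-- stated objective: simpler
-- what changed: Replaces A's three loops (collecting two index lists by string indexing, then two pairwise-difference passes over those lists) by a single left-to-right scan per bracket kind that counts the bracket and tracks with a tiny flag machine whether its occurrences form one contiguous run, using no index lists at all.
import Mathlib
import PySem

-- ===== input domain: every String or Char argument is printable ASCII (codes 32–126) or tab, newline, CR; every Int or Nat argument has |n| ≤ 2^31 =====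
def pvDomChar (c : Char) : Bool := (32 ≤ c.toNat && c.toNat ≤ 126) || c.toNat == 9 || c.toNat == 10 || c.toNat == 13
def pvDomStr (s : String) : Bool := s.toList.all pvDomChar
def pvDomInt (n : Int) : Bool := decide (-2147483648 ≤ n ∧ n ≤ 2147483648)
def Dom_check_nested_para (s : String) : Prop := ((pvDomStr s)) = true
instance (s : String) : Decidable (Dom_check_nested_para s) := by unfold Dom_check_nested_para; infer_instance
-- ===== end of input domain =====

-- B replaces A's three loops (two index lists + two pairwise-difference passes) by one
-- counting/contiguity scan per bracket kind (objective: simpler; same O(n) cost).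

-- ===== PORT A =====
-- the while loop: walk the characters with index i, appending i to the '('-list / ')'-list
def pvBuildIds : List Char → Int → List Int × List Int → List Int × List Int
  | [], _, acc => acc
  | c :: rest, i, acc =>
      pvBuildIds rest (i + 1)
        ((if c = '(' then acc.1 ++ [i] else acc.1), (if c = ')' then acc.2 ++ [i] else acc.2))

def check_nested_para (s : String) : Bool :=
  let t := (PySem.Str.replace s "*" "").toList
  let ids := pvBuildIds t 0 ([], [])
  if PySem.List.len ids.1 > 1 then
    let foundL := (PySem.List.pyRange 1 (PySem.List.len ids.1) 1).foldl
      (fun found i =>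
        if PySem.List.pyGetD ids.1 i 0 - PySem.List.pyGetD ids.1 (i - 1) 0 ≠ 1 then false
        else found) true
    let foundR := (PySem.List.pyRange 1 (PySem.List.len ids.2) 1).foldl
      (fun found i =>
        if PySem.List.pyGetD ids.2 i 0 - PySem.List.pyGetD ids.2 (i - 1) 0 ≠ 1 then false
        else found) true
    foundL && foundR
  else false

-- ===== PORT B =====
-- _scan: one pass, returns (count of ch, whether all ch are adjacent to each other)
def pvScan (ch : Char) : List Char → Int → Bool → Bool → Int × Bool
  | [], cnt, solid, _ => (cnt, solid)
  | c :: rest, cnt, solid, after =>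
      if c = ch then pvScan ch rest (cnt + 1) (if after then false else solid) after
      else pvScan ch rest cnt solid (if cnt > 0 then true else after)

def check_nested_para_alt (s : String) : Bool :=
  let t := (PySem.Str.replace s "*" "").toList
  let l := pvScan '(' t 0 true false
  decide (l.1 > 1) && l.2 && (pvScan ')' t 0 true false).2

-- ===== PRECONDITION & SPEC =====
def Spec_check_nested_para (s : String) (out : Bool) : Prop := out = check_nested_para_alt s
instance (s : String) (out : Bool) : Decidable (Spec_check_nested_para s out) := by unfold Spec_check_nested_para; infer_instance

-- ===== CLAIM (what is proved, stated in full; the proofs are below) =====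
def Claim_equal_check_nested_para : Prop := ∀ (s : String), Dom_check_nested_para s → Spec_check_nested_para s (check_nested_para s)

-- ===== LEMMAS AND PROOFS =====

-- indices (counted from i) at which character c occurs
def pvPos (c : Char) : List Char → Int → List Int
  | [], _ => []
  | x :: xs, i => if x = c then i :: pvPos c xs (i + 1) else pvPos c xs (i + 1)

-- boolean "consecutive entries differ by 1"
def pvChainB : List Int → Bool
  | [] => true
  | [_] => true
  | a :: b :: t => decide (b - a = 1) && pvChainB (b :: t)

lemma pvBuildIds_eq (l : List Char) : ∀ (i : Int) (L R : List Int),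
    pvBuildIds l i (L, R) = (L ++ pvPos '(' l i, R ++ pvPos ')' l i) := by
  induction l with
  | nil => intro i L R; simp [pvBuildIds, pvPos]
  | cons x xs ih =>
    intro i L R
    simp only [pvBuildIds, pvPos]
    by_cases h1 : x = '(' <;> by_cases h2 : x = ')' <;>
      simp [h1, h2, ih, List.append_assoc]
lemma pvPos_length (c : Char) (l : List Char) : ∀ i : Int, (pvPos c l i).length = l.count c := by
  induction l with
  | nil => intro i; simp [pvPos]
  | cons x xs ih =>
    intro i
    by_cases h : x = c <;> simp [pvPos, h, ih]

lemma pvPos_ge (c : Char) (l : List Char) : ∀ (i x : Int), x ∈ pvPos c l i → i ≤ x := by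
  induction l with
  | nil => intro i x h; simp [pvPos] at h
  | cons y ys ih =>
    intro i x h
    by_cases hy : y = c <;> simp [pvPos, hy] at h
    · rcases h with h | h
      · omega
      · have := ih (i + 1) x h; omega
    · have := ih (i + 1) x h; omega

lemma pvChainB_eq : ∀ L : List Int,
    pvChainB L = decide (List.IsChain (fun a b : Int => b - a = 1) L) := by
  intro L
  induction L with
  | nil => simp [pvChainB]
  | cons a L ih =>
    cases L with
    | nil => simp [pvChainB]
    | cons b t =>
      simp [pvChainB, ih, List.isChain_cons_cons]

lemma pvScan_fst (ch : Char) (t : List Char) : ∀ (cnt : Int) (solid after : Bool),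
    (pvScan ch t cnt solid after).1 = cnt + t.count ch := by
  induction t with
  | nil => intro cnt solid after; simp [pvScan]
  | cons x xs ih =>
    intro cnt solid after
    by_cases h : x = ch
    · simp [pvScan, h, ih]
      omega
    · simp [pvScan, h, ih]

lemma pvScan_snd (ch : Char) (t : List Char) :
    (∀ (i : Int) (solid : Bool),
        (pvScan ch t 0 solid false).2
          = (solid && decide (List.IsChain (fun a b : Int => b - a = 1) (pvPos ch t i))))
  ∧ (∀ (i cnt : Int) (solid : Bool), 0 < cnt →
        (pvScan ch t cnt solid false).2
          = (solid && decide (List.IsChain (fun a b : Int => b - a = 1) ((i - 1) :: pvPos ch t i))))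
  ∧ (∀ (i cnt : Int) (solid : Bool),
        (pvScan ch t cnt solid true).2 = (solid && decide (pvPos ch t i = []))) := by
  induction t with
  | nil =>
    refine ⟨?_, ?_, ?_⟩ <;> intro i <;> simp [pvScan, pvPos]
  | cons x xs ih =>
    obtain ⟨ih1, ih2, ih3⟩ := ih
    refine ⟨?_, ?_, ?_⟩
    · intro i solid
      simp only [pvScan]
      by_cases h : x = ch
      · subst h
        rw [if_pos rfl, if_neg (Bool.false_ne_true), ih2 (i + 1) (0 + 1) solid (by omega)]
        simp [pvPos, show i + 1 - 1 = i from by ring]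
      · rw [if_neg h, if_neg (by omega : ¬ ((0:Int) > 0)), ih1 (i + 1) solid]
        simp [pvPos, h]
    · intro i cnt solid hc
      simp only [pvScan]
      by_cases h : x = ch
      · subst h
        rw [if_pos rfl, if_neg (Bool.false_ne_true), ih2 (i + 1) (cnt + 1) solid (by omega)]
        simp only [pvPos, show i + 1 - 1 = i from by ring]
        congr 1
        congr 1
        simp [List.isChain_cons_cons, show i - (i - 1) = 1 from by ring]
      · rw [if_neg h, if_pos (by omega : cnt > 0), ih3 (i + 1) cnt solid]
        simp only [pvPos, if_neg h]
        congr 1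
        rcases hp : pvPos ch xs (i + 1) with _ | ⟨q, rest⟩
        · simp
        · have hq : i + 1 ≤ q := pvPos_ge ch xs (i + 1) q (by rw [hp]; exact List.mem_cons_self)
          simp only [decide_eq_decide]
          apply iff_of_false
          · simp
          · rw [List.isChain_cons_cons]
            rintro ⟨h1, -⟩
            omega
    · intro i cnt solid
      simp only [pvScan]
      by_cases h : x = ch
      · subst h
        rw [if_pos rfl]
        simp only [if_true]
        rw [ih3 (i + 1) (cnt + 1) false]
        simp [pvPos]
      · rw [if_neg h, ite_self, ih3 (i + 1) cnt solid]
        simp [pvPos, h]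

lemma pvFoldlStop (p : Int → Prop) [DecidablePred p] (l : List Int) : ∀ acc : Bool,
    l.foldl (fun f j => if p j then false else f) acc = (acc && l.all fun j => !decide (p j)) := by
  induction l with
  | nil => intro acc; simp
  | cons x xs ih =>
    intro acc
    rw [List.foldl_cons, ih]
    by_cases h : p x <;> simp [h]

lemma pvAllAdj (L : List Int) :
    ((PySem.List.pyRange 1 (L.length : Int) 1).all
        fun j => !decide (PySem.List.pyGetD L j 0 - PySem.List.pyGetD L (j - 1) 0 ≠ 1))
      = pvChainB L := by
  rw [pvChainB_eq, Bool.eq_iff_iff]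
  simp only [List.all_eq_true, Bool.not_eq_true', decide_eq_false_iff_not, not_not,
    PySem.List.mem_pyRange_one, decide_eq_true_eq, List.isChain_iff_getElem, and_imp]
  constructor
  · intro h k hk
    have hb1 : (1 : Int) ≤ ((k + 1 : Nat) : Int) := by push_cast; omega
    have hb2 : ((k + 1 : Nat) : Int) < (L.length : Int) := by push_cast; omega
    have := h ((k + 1 : Nat) : Int) hb1 hb2
    rw [PySem.List.pyGetD_eq_getElem L 0 (by omega) (by exact_mod_cast hb2),
        PySem.List.pyGetD_eq_getElem L 0 (by omega) (by push_cast; omega)] at this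
    have e1 : (((k + 1 : Nat) : Int)).toNat = k + 1 := by omega
    have e2 : (((k + 1 : Nat) : Int) - 1).toNat = k := by omega
    simp only [e1, e2] at this
    exact this
  · intro h j h1 h2
    have hk : 0 < j.toNat ∧ j.toNat < L.length := by omega
    rw [PySem.List.pyGetD_eq_getElem L 0 (by omega) h2,
        PySem.List.pyGetD_eq_getElem L 0 (by omega) (by omega)]
    have := h (j.toNat - 1) (by omega)
    have e1 : j.toNat - 1 + 1 = j.toNat := by omega
    have e2 : (j - 1).toNat = j.toNat - 1 := by omega
    simp only [e1] at this
    simp only [e2]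
    exact this

-- ===== VERDICT (by name: the statement is the Claim_ definition above) =====
theorem check_nested_para_spec : Claim_equal_check_nested_para := by
  intro s _
  unfold Spec_check_nested_para check_nested_para check_nested_para_alt
  generalize (PySem.Str.replace s "*" "").toList = t
  simp only [pvBuildIds_eq t 0 [] [], List.nil_append, PySem.List.len_eq]
  rw [pvFoldlStop (fun j => PySem.List.pyGetD (pvPos '(' t 0) j 0
        - PySem.List.pyGetD (pvPos '(' t 0) (j - 1) 0 ≠ 1),
      pvFoldlStop (fun j => PySem.List.pyGetD (pvPos ')' t 0) j 0
        - PySem.List.pyGetD (pvPos ')' t 0) (j - 1) 0 ≠ 1)]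
  simp only [Bool.true_and, pvAllAdj]
  rw [pvScan_fst '(' t 0 true false,
      (pvScan_snd '(' t).1 0 true, (pvScan_snd ')' t).1 0 true]
  simp only [Bool.true_and, pvChainB_eq]
  have hlen : (pvPos '(' t 0).length = t.count '(' := pvPos_length '(' t 0
  split_ifs with h
  · have : (0 : Int) + t.count '(' > 1 := by omega
    simp only [this]
    simp
  · have : ¬ ((0 : Int) + t.count '(' > 1) := by omega
    simp
    intro h1 _
    exfalso
    omega
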